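-- pv_equiv track=rewrite | github.com/michalz1mniak/Matury | maj2023/rozwiazania/zadanie3/3_3.py | czy_rosnaco_malejacy
-- ===== SOURCE A (Python) =====
-- def czy_rosnaco_malejacy(ciag):
--     if ciag[0] >= ciag[1]:
--         return False
--     zmiana = 0
--
--     for i in range(1,len(ciag)-1):
--         if zmiana == 0:
--             if ciag[i] < ciag[i+1]:
--                 continue
--             else:
--                 zmiana = 1
--                 continue
--         else:
--             if ciag[i] > ciag[i+1]:
--                 continue
--             else:
--                 return False
--     if zmiana == 1:
--         return True
--     else: return False
-- ===== SOURCE B (Python) =====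
-- def czy_rosnaco_malejacy(ciag):
--     # Build the comparison table once, then locate the peak with list.index
--     # and verify the descent with all() over slices -- no state flag, no index loop.
--     rel = [a < b for a, b in zip(ciag, ciag[1:])]
--     if not rel[0]:
--         return False
--     if all(rel[1:]):
--         return False  # strictly increasing throughout: no descending part
--     k = rel.index(False)  # first non-increase (>= 1 since rel[0] is True)
--     # the pair at k is the peak/transition (equality allowed there);
--     # every later pair must be strictly decreasing
--     return all(a > b for a, b in zip(ciag[k + 1:], ciag[k + 2:]))
-- ===== Notes on version B (the rewrite author's own statement) =====
-- stated objective: alternative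
-- what changed: Replaces A's stateful flagged scan with a comparison table built once from zip, a peak search via list.index, and an all() check over slices after the peak.
import Mathlib
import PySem

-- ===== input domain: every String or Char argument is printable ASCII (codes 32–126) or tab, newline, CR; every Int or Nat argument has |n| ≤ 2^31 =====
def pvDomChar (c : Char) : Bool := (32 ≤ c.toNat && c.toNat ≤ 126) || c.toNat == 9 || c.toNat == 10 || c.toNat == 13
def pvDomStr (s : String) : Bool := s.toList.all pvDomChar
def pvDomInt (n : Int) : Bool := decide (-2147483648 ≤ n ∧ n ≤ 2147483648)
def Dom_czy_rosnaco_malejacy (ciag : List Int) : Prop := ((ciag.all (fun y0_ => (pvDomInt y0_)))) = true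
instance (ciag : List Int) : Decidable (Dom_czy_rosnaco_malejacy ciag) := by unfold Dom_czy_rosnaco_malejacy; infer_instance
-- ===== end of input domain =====

-- B replaces A's stateful flagged scan by a table of adjacent comparisons built once,
-- a peak search with list.index, and an all() check over slices; same O(n) cost.

-- ===== PORT A =====
-- A's for-loop over range(1, len-1) with the zmiana flag and early return.
-- Indices i and i+1 drawn from the range are always in bounds, so pyGetD with
-- default 0 is exact here (the default is never used).
def pvALoop (ciag : List Int) (idxs : List Int) (zmiana : Int) : Bool :=
  match idxs with
  | [] => zmiana == 1
  | i :: rest =>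
    if zmiana == 0 then
      if PySem.List.pyGetD ciag i 0 < PySem.List.pyGetD ciag (i + 1) 0 then
        pvALoop ciag rest 0
      else
        pvALoop ciag rest 1
    else
      if PySem.List.pyGetD ciag i 0 > PySem.List.pyGetD ciag (i + 1) 0 then
        pvALoop ciag rest zmiana
      else
        false

def czy_rosnaco_malejacy (ciag : List Int) : Bool :=
  -- the first two elements: Pre_ guarantees length ≥ 2, so both indexes are in range
  if PySem.List.pyGetD ciag 0 0 ≥ PySem.List.pyGetD ciag 1 0 then false
  else pvALoop ciag (PySem.List.pyRange 1 ((ciag.length : Int) - 1) 1) 0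

-- ===== PORT B =====
-- the comparison table from zip with the tail; its first entry (in range under Pre_, so
-- pyGetD's default is never used); all(rel[1:]); rel.index(False) (present because
-- the previous guard failed, so index?'s getD default is never used); finally the
-- all() over zip(ciag[k+1:], ciag[k+2:]).
def czy_rosnaco_malejacy_alt (ciag : List Int) : Bool :=
  let rel : List Bool := (ciag.zip (PySem.List.slice ciag (some 1) none)).map
    (fun p => decide (p.1 < p.2))
  if !(PySem.List.pyGetD rel 0 false) then false
  else if (PySem.List.slice rel (some 1) none).all (fun b => b) then false
  else
    let k : Int := (((PySem.List.index? rel false).getD 0 : Nat) : Int)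
    ((PySem.List.slice ciag (some (k + 1)) none).zip
        (PySem.List.slice ciag (some (k + 2)) none)).all
      (fun p => decide (p.1 > p.2))

-- ===== PRECONDITION & SPEC =====
-- A indexes the first two elements unconditionally: lists shorter than 2 raise IndexError.
def Pre_czy_rosnaco_malejacy (ciag : List Int) : Prop := 2 ≤ ciag.length
instance (ciag : List Int) : Decidable (Pre_czy_rosnaco_malejacy ciag) := by unfold Pre_czy_rosnaco_malejacy; infer_instance
def pvWitness_czy_rosnaco_malejacy : List Int := [1, 3, 2]

def Spec_czy_rosnaco_malejacy (ciag : List Int) (out : Bool) : Prop := out = czy_rosnaco_malejacy_alt ciag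
instance (ciag : List Int) (out : Bool) : Decidable (Spec_czy_rosnaco_malejacy ciag out) := by unfold Spec_czy_rosnaco_malejacy; infer_instance

-- ===== CLAIM (what is proved, stated in full; the proofs are below) =====
def Claim_equal_czy_rosnaco_malejacy : Prop := ∀ (ciag : List Int), Dom_czy_rosnaco_malejacy ciag → Pre_czy_rosnaco_malejacy ciag → Spec_czy_rosnaco_malejacy ciag (czy_rosnaco_malejacy ciag)

-- ===== LEMMAS AND PROOFS =====

-- canonical form of A's loop started in state zmiana = 0, as a structural
-- function on the list of adjacent pairs
def pvAux0 : List (Int × Int) → Bool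
  | [] => false
  | p :: r => if p.1 < p.2 then pvAux0 r else r.all (fun q => decide (q.1 > q.2))

theorem pvDropZip {α β : Type} : ∀ (n : Nat) (xs : List α) (ys : List β),
    (xs.zip ys).drop n = (xs.drop n).zip (ys.drop n) := by
  intro n
  induction n with
  | zero => intro xs ys; rfl
  | succ m ih =>
    intro xs ys
    cases xs with
    | nil => simp
    | cons x xs' =>
      cases ys with
      | nil => simp
      | cons y ys' => simpa using ih xs' ys'

-- A's loop in state zmiana = 1 checks that all remaining pairs strictly decrease.
theorem pvALoop_one (ciag : List Int) :
    ∀ (k : Nat) (i : Int), 0 ≤ i → (((ciag.length : Int) - 1) - i).toNat ≤ k →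
      pvALoop ciag (PySem.List.pyRange i ((ciag.length : Int) - 1) 1) 1 =
        ((ciag.zip ciag.tail).drop i.toNat).all (fun q => decide (q.1 > q.2)) := by
  intro k
  induction k with
  | zero =>
    intro i hi hk
    rw [PySem.List.pyRange_one_eq_nil (by omega),
      List.drop_eq_nil_of_le (by simp; omega)]
    simp [pvALoop]
  | succ m ih =>
    intro i hi hk
    by_cases h : i < (ciag.length : Int) - 1
    · have hiN : i.toNat < (ciag.zip ciag.tail).length := by simp; omega
      have hiL : i.toNat + 1 < ciag.length := by omega
      rw [PySem.List.pyRange_one_cons h, List.drop_eq_getElem_cons hiN]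
      have hget : (ciag.zip ciag.tail)[i.toNat]'hiN
          = (ciag[i.toNat]'(by omega), ciag[i.toNat + 1]'hiL) := by
        simp [List.getElem_zip, List.getElem_tail]
      simp only [pvALoop, show ((1 : Int) == 0) = false by decide, Bool.false_eq_true, if_false]
      rw [PySem.List.pyGetD_eq_getElem (xs := ciag) (i := i) 0 (by omega) (by omega),
        PySem.List.pyGetD_eq_getElem (xs := ciag) (i := i + 1) 0 (by omega) (by omega)]
      simp only [hget, List.all_cons, show (i + 1).toNat = i.toNat + 1 by omega]
      by_cases hgt : ciag[i.toNat]'(by omega) > ciag[i.toNat + 1]'hiL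
      · rw [if_pos hgt, ih (i + 1) (by omega) (by omega),
          show (i + 1).toNat = i.toNat + 1 by omega]
        simp [hgt]
      · rw [if_neg hgt]
        simp [hgt]
    · rw [PySem.List.pyRange_one_eq_nil (by omega),
        List.drop_eq_nil_of_le (by simp; omega)]
      simp [pvALoop]

-- A's loop in state zmiana = 0 is pvAux0 on the remaining pairs.
theorem pvALoop_zero (ciag : List Int) :
    ∀ (k : Nat) (i : Int), 0 ≤ i → (((ciag.length : Int) - 1) - i).toNat ≤ k →
      pvALoop ciag (PySem.List.pyRange i ((ciag.length : Int) - 1) 1) 0 =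
        pvAux0 ((ciag.zip ciag.tail).drop i.toNat) := by
  intro k
  induction k with
  | zero =>
    intro i hi hk
    rw [PySem.List.pyRange_one_eq_nil (by omega),
      List.drop_eq_nil_of_le (by simp; omega)]
    simp [pvALoop, pvAux0]
  | succ m ih =>
    intro i hi hk
    by_cases h : i < (ciag.length : Int) - 1
    · have hiN : i.toNat < (ciag.zip ciag.tail).length := by simp; omega
      have hiL : i.toNat + 1 < ciag.length := by omega
      rw [PySem.List.pyRange_one_cons h, List.drop_eq_getElem_cons hiN]
      have hget : (ciag.zip ciag.tail)[i.toNat]'hiN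
          = (ciag[i.toNat]'(by omega), ciag[i.toNat + 1]'hiL) := by
        simp [List.getElem_zip, List.getElem_tail]
      simp only [pvALoop, show ((0 : Int) == 0) = true by decide, if_true]
      rw [PySem.List.pyGetD_eq_getElem (xs := ciag) (i := i) 0 (by omega) (by omega),
        PySem.List.pyGetD_eq_getElem (xs := ciag) (i := i + 1) 0 (by omega) (by omega)]
      simp only [hget, pvAux0, show (i + 1).toNat = i.toNat + 1 by omega]
      by_cases hlt : ciag[i.toNat]'(by omega) < ciag[i.toNat + 1]'hiL
      · rw [if_pos hlt, if_pos hlt, ih (i + 1) (by omega) (by omega),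
          show (i + 1).toNat = i.toNat + 1 by omega]
      · rw [if_neg hlt, if_neg hlt,
          pvALoop_one ciag (((ciag.length : Int) - 1) - (i + 1)).toNat (i + 1) (by omega) le_rfl,
          show (i + 1).toNat = i.toNat + 1 by omega]
    · rw [PySem.List.pyRange_one_eq_nil (by omega),
        List.drop_eq_nil_of_le (by simp; omega)]
      simp [pvALoop, pvAux0]

-- if every adjacent pair still increases, pvAux0 never leaves the first branch
theorem pvAux0_of_all (l : List (Int × Int))
    (h : (l.map (fun p => decide (p.1 < p.2))).all (fun b => b) = true) :
    pvAux0 l = false := by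
  induction l with
  | nil => rfl
  | cons p r ih =>
    simp only [List.map_cons, List.all_cons] at h
    obtain ⟨hp, hr⟩ := by simpa using h
    simp [pvAux0, hp, ih (by simpa using hr)]

-- pvAux0 at the first non-increase: skip that pair and check strict descent after it
theorem pvAux0_of_index (l : List (Int × Int)) :
    ∀ (k' : Nat), PySem.List.index? (l.map (fun p => decide (p.1 < p.2))) false = some k' →
      pvAux0 l = (l.drop (k' + 1)).all (fun q => decide (q.1 > q.2)) := by
  induction l with
  | nil => intro k' h; simp [PySem.List.index?_eq_idxOf?] at h
  | cons p r ih =>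
    intro k' h
    by_cases hp : p.1 < p.2
    · rw [List.map_cons, show decide (p.1 < p.2) = true by simpa using hp,
        PySem.List.index?_cons_of_ne _ (by simp)] at h
      cases hidx : PySem.List.index? (r.map (fun p => decide (p.1 < p.2))) false with
      | none => rw [hidx] at h; simp at h
      | some k'' =>
        rw [hidx] at h
        simp only [Option.map_some, Option.some.injEq] at h
        subst h
        rw [show k'' + 1 + 1 = (k'' + 1) + 1 from rfl, List.drop_succ_cons]
        simpa [pvAux0, hp] using ih k'' hidx
    · rw [List.map_cons, show decide (p.1 < p.2) = false by simpa using hp,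
        PySem.List.index?_cons_self] at h
      have hk : k' = 0 := by simpa using h.symm
      subst hk
      simp [pvAux0, hp]

-- ===== VERDICT (by name: the statement is the Claim_ definition above) =====
theorem czy_rosnaco_malejacy_spec : Claim_equal_czy_rosnaco_malejacy := by
  intro ciag _ hpre
  unfold Pre_czy_rosnaco_malejacy at hpre
  match ciag, hpre with
  | a :: b :: t, _ =>
  unfold Spec_czy_rosnaco_malejacy
  simp only [czy_rosnaco_malejacy, czy_rosnaco_malejacy_alt]
  have hg0 : PySem.List.pyGetD (a :: b :: t) 0 0 = a := PySem.List.pyGetD_zero_cons a _ 0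
  have hg1 : PySem.List.pyGetD (a :: b :: t) 1 0 = b := by
    simp [PySem.List.pyGetD, PySem.List.pyGet?, PySem.List.pyIdx?]
  rw [hg0, hg1, PySem.List.slice_from_one]
  simp only [List.tail_cons, List.zip_cons_cons, List.map_cons, PySem.List.pyGetD_zero_cons]
  by_cases hab : a < b
  · rw [if_neg (by omega), if_neg (by simp [hab]),
      show decide (a < b) = true by simpa using hab]
    have hA := pvALoop_zero (a :: b :: t) ((((a :: b :: t).length : Int) - 1) - 1).toNat 1
      (by omega) le_rfl
    rw [hA, show (((a :: b :: t).zip (a :: b :: t).tail).drop (1 : Int).toNat)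
        = (b :: t).zip t by simp, PySem.List.slice_from_one]
    simp only [List.tail_cons]
    by_cases hall : (((b :: t).zip t).map (fun p => decide (p.1 < p.2))).all (fun x => x) = true
    · rw [if_pos (by simpa using hall)]
      exact pvAux0_of_all _ hall
    · rw [if_neg (by simpa using hall)]
      have hmem : false ∈ ((b :: t).zip t).map (fun p => decide (p.1 < p.2)) := by
        rcases (by simpa using hall :
            ∃ x ∈ ((b :: t).zip t).map (fun p => decide (p.1 < p.2)), ¬ x = true) with ⟨x, hx, hxf⟩
        have hxe : x = false := by cases x <;> simp_all
        exact hxe ▸ hx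
      have hne : PySem.List.index? (((b :: t).zip t).map (fun p => decide (p.1 < p.2))) false ≠ none := by
        rw [Ne, PySem.List.index?_eq_none_iff]
        simp only [not_not]
        exact hmem
      rcases Option.ne_none_iff_exists'.mp hne with ⟨k', hk'⟩
      rw [PySem.List.index?_cons_of_ne _ (by simp), hk']
      simp only [Option.map_some, Option.getD_some]
      rw [show ((((k' + 1 : Nat) : Int)) + 1) = ((k' + 2 : Nat) : Int) by push_cast; ring,
        show ((((k' + 1 : Nat) : Int)) + 2) = ((k' + 3 : Nat) : Int) by push_cast; ring,
        PySem.List.slice_from_natCast, PySem.List.slice_from_natCast,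
        pvAux0_of_index _ k' hk']
      have hdz : ((b :: t).zip t).drop (k' + 1) =
          ((a :: b :: t).drop (k' + 2)).zip ((a :: b :: t).drop (k' + 3)) := by
        rw [show ((b :: t).zip t).drop (k' + 1)
            = (((a :: b :: t).zip (a :: b :: t).tail).drop (k' + 2)) by simp,
          pvDropZip]
        rfl
      rw [hdz]
  · rw [if_pos (by omega), if_pos (by simp [hab])]
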